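-- pv_equiv track=rewrite | github.com/AndresLesmesg/file-system-storage | app/src/utils.py | get_previous_file
-- ===== SOURCE A (Python) =====
-- def get_previous_file(data, filename):
--     file = ''
--     for item in data:
--         if item[1] == filename:
--             return file
--         if(item[3] != 'undefined' and item[3] != 'hidden'):
--             file = item[1]
--     return None
-- ===== SOURCE B (Python) =====
-- def get_previous_file(data, filename):
--     names = [item[1] for item in data]
--     if filename not in names:
--         return None
--     before = data[:names.index(filename)]
--     for item in reversed(before):
--         if item[3] not in ('undefined', 'hidden'):
--             return item[1]
--     return ''
-- ===== Notes on version B (the rewrite author's own statement) =====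
-- stated objective: alternative
-- what changed: Replaces A's single stateful forward pass (accumulator holding the last visible name) with a locate-then-backward-search: find the index of the first matching filename, then scan the prefix backward for the first visible item.
import Mathlib
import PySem

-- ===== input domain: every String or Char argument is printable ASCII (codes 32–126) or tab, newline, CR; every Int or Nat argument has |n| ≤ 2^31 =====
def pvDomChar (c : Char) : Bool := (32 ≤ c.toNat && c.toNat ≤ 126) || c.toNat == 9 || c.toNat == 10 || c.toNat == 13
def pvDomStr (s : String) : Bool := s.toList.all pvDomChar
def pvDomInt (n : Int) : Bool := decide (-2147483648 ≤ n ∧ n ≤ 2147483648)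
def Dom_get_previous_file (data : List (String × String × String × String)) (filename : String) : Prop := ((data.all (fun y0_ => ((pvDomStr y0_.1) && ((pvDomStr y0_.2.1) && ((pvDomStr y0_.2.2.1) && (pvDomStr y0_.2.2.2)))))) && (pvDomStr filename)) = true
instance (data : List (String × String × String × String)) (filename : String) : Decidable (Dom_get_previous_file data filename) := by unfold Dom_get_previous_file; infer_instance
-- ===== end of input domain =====

-- B replaces A's single stateful forward pass (accumulator = last visible name) by
-- locate-the-match-then-scan-backward over the prefix; return value only, alternative decomposition.

-- ===== PORT A =====
-- A's for-loop with the 'file' accumulator, step for step.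
def get_previous_file_goA (filename : String) (file : String) :
    List (String × String × String × String) → Option String
  | [] => none
  | item :: rest =>
    if item.2.1 = filename then some file
    else
      get_previous_file_goA filename
        (if item.2.2.2 ≠ "undefined" ∧ item.2.2.2 ≠ "hidden" then item.2.1 else file) rest

def get_previous_file (data : List (String × String × String × String)) (filename : String) : Option String :=
  get_previous_file_goA filename "" data

-- ===== PORT B =====
def get_previous_file_alt (data : List (String × String × String × String)) (filename : String) : Option String :=
  let names := data.map (fun item => item.2.1)
  if filename ∈ names then
    let before := PySem.List.slice data none (some (((PySem.List.index? names filename).getD 0 : Nat) : Int))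
    match before.reverse.find? (fun item => !(item.2.2.2 == "undefined" || item.2.2.2 == "hidden")) with
    | some item => some item.2.1
    | none => some ""
  else none

-- ===== PRECONDITION & SPEC =====
def Spec_get_previous_file (data : List (String × String × String × String)) (filename : String) (out : Option String) : Prop := out = get_previous_file_alt data filename
instance (data : List (String × String × String × String)) (filename : String) (out : Option String) : Decidable (Spec_get_previous_file data filename out) := by unfold Spec_get_previous_file; infer_instance

-- ===== CLAIM (what is proved, stated in full; the proofs are below) =====
def Claim_equal_get_previous_file : Prop := ∀ (data : List (String × String × String × String)) (filename : String), Dom_get_previous_file data filename → Spec_get_previous_file data filename (get_previous_file data filename)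

-- ===== LEMMAS AND PROOFS =====

-- characterisation of A's loop in B's locate-then-backward shape, generalised over the accumulator
theorem get_previous_file_goA_eq (filename : String) :
    ∀ (data : List (String × String × String × String)) (file : String),
      get_previous_file_goA filename file data =
        match PySem.List.index? (data.map (fun item => item.2.1)) filename with
        | none => none
        | some i =>
          some ((((data.take i).reverse.find?
              (fun item => !(item.2.2.2 == "undefined" || item.2.2.2 == "hidden"))).map
              (fun item => item.2.1)).getD file)
  | [], file => by simp [get_previous_file_goA, PySem.List.index?]
  | item :: rest, file => by
    by_cases h : item.2.1 = filename
    · subst h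
      rw [show (item :: rest).map (fun it => it.2.1) = item.2.1 :: rest.map (fun it => it.2.1) from rfl,
        PySem.List.index?_cons_self]
      simp [get_previous_file_goA]
    · rw [show (item :: rest).map (fun item => item.2.1) = item.2.1 :: rest.map (fun item => item.2.1) from rfl,
        PySem.List.index?_cons_of_ne _ h]
      simp only [get_previous_file_goA, if_neg h]
      rw [get_previous_file_goA_eq filename rest]
      cases hidx : PySem.List.index? (rest.map (fun item => item.2.1)) filename with
      | none => simp
      | some i =>
        simp only [Option.map_some]
        rw [show (item :: rest).take (i + 1) = item :: rest.take i from rfl]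
        rw [show (item :: rest.take i).reverse = (rest.take i).reverse ++ [item] from by simp]
        rw [List.find?_append]
        cases hf : (rest.take i).reverse.find?
            (fun item => !(item.2.2.2 == "undefined" || item.2.2.2 == "hidden")) with
        | some v => simp
        | none =>
          by_cases hv : item.2.2.2 ≠ "undefined" ∧ item.2.2.2 ≠ "hidden"
          · have : (!(item.2.2.2 == "undefined" || item.2.2.2 == "hidden")) = true := by
              simp [hv.1, hv.2]
            simp [List.find?, this, if_pos hv]
          · have : (!(item.2.2.2 == "undefined" || item.2.2.2 == "hidden")) = false := by
              by_contra hc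
              exact hv (by simpa using Bool.of_not_eq_false hc)
            simp [List.find?, this, if_neg hv]

-- ===== VERDICT (by name: the statement is the Claim_ definition above) =====
theorem get_previous_file_spec : Claim_equal_get_previous_file := by
  intro data filename _
  unfold Spec_get_previous_file get_previous_file get_previous_file_alt
  rw [get_previous_file_goA_eq]
  cases hidx : PySem.List.index? (data.map (fun item => item.2.1)) filename with
  | none =>
    have hnm : filename ∉ data.map (fun item => item.2.1) :=
      (PySem.List.index?_eq_none_iff _ _).mp hidx
    simp [hnm]
  | some i =>
    have hm : filename ∈ data.map (fun item => item.2.1) := by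
      have := (PySem.List.index?_isSome_iff (data.map (fun item => item.2.1)) filename)
      rw [hidx] at this; exact this.mp rfl
    simp only [hm, if_pos, hidx, Option.getD_some]
    rw [PySem.List.slice_to_natCast]
    cases hf : (data.take i).reverse.find?
        (fun item => !(item.2.2.2 == "undefined" || item.2.2.2 == "hidden")) with
    | some v => simp
    | none => simp
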